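-- pv_equiv track=rewrite | github.com/daviddjia/advent_of_code_2020 | day21.py | build_data_structures
-- ===== SOURCE A (Python) =====
-- def build_data_structures(foods):
--     all_allergens = set()
--     for _, allergens in foods:
--         for allergen in allergens:
--             all_allergens.add(allergen)
--
--     food_map = {allergen: [] for allergen in all_allergens}
--     ingredient_map = {allergen: set() for allergen in all_allergens}
--     for food, allergens in foods:
--         for allergen in allergens:
--             food_map[allergen].append(food)
--             ingredient_map[allergen].update(set(food))
--
--     return food_map, ingredient_map
-- ===== SOURCE B (Python) =====
-- def build_data_structures(foods):
--     # Flatten to (allergen, food) pairs, then group by distinct allergen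
--     # (first-occurrence order) with per-key comprehensions.
--     pairs = [(a, food) for food, allergens in foods for a in allergens]
--     keys = list(dict.fromkeys(a for a, _ in pairs))
--     food_map = {k: [f for a, f in pairs if a == k] for k in keys}
--     ingredient_map = {k: {i for a, f in pairs if a == k for i in f} for k in keys}
--     return food_map, ingredient_map
-- ===== Notes on version B (the rewrite author's own statement) =====
-- stated objective: alternative
-- what changed: B replaces A's incremental dict mutation (a pre-scan of allergens, two empty-map comprehensions, then a nested fill loop appending/updating entries in place) with a flatten-then-group-by computation: it flattens foods to (allergen, food) pairs once, dedups the allergen keys, and builds each map directly with a per-key comprehension that filters the pair list.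
import Mathlib
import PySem

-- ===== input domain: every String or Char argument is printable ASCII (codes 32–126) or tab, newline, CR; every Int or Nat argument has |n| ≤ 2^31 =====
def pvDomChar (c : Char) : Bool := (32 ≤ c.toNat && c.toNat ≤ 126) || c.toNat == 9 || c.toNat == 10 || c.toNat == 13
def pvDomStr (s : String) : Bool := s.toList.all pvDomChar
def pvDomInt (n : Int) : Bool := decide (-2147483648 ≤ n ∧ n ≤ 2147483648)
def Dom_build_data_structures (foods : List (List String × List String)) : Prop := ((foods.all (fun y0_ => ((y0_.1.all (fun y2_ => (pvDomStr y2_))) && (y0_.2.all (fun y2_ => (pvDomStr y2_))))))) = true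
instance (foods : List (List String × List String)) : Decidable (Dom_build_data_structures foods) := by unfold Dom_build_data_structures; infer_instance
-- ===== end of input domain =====

-- B groups by key instead of mutating dicts: it flattens foods to (allergen, food) pairs, dedups the keys, and builds each map with per-key filtering comprehensions (alternative decomposition, same results).
-- ===== PORT A =====
def build_data_structures (foods : List (List String × List String)) : (List (String × List (List String))) × (List (String × List String)) :=
  let all_allergens : PySem.Set String :=
    foods.foldl (fun s p => p.2.foldl PySem.Set.add s) PySem.Set.empty
  let food_map : PySem.Dict String (List (List String)) :=
    all_allergens.foldl (fun d a => d.insert a []) PySem.Dict.empty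
  let ingredient_map : PySem.Dict String (PySem.Set String) :=
    all_allergens.foldl (fun d a => d.insert a PySem.Set.empty) PySem.Dict.empty
  let res :=
    foods.foldl (fun (st : PySem.Dict String (List (List String)) × PySem.Dict String (PySem.Set String)) p =>
      p.2.foldl (fun st a =>
        (st.1.modify a [] (fun v => v ++ [p.1]),
         st.2.modify a PySem.Set.empty (fun s => PySem.Set.update s (PySem.Set.ofList p.1)))) st)
      (food_map, ingredient_map)
  (res.1.items, res.2.items)

-- ===== PORT B =====
def build_data_structures_alt (foods : List (List String × List String)) : (List (String × List (List String))) × (List (String × List String)) :=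
  let pairs : List (String × List String) := foods.flatMap (fun p => p.2.map (fun a => (a, p.1)))
  let keys : List String := PySem.List.dedup (pairs.map Prod.fst)
  (keys.map (fun k => (k, (pairs.filter (fun e => e.1 == k)).map Prod.snd)),
   keys.map (fun k => (k, (PySem.Set.ofList ((pairs.filter (fun e => e.1 == k)).flatMap Prod.snd) : PySem.Set String))))

-- ===== PRECONDITION & SPEC =====
def Spec_build_data_structures (foods : List (List String × List String)) (out : (List (String × List (List String))) × (List (String × List String))) : Prop := out = build_data_structures_alt foods
instance (foods : List (List String × List String)) (out : (List (String × List (List String))) × (List (String × List String))) : Decidable (Spec_build_data_structures foods out) := by unfold Spec_build_data_structures; infer_instance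

-- ===== CLAIM (what is proved, stated in full; the proofs are below) =====
def Claim_equal_build_data_structures : Prop := ∀ (foods : List (List String × List String)), Dom_build_data_structures foods → Spec_build_data_structures foods (build_data_structures foods)

-- ===== LEMMAS AND PROOFS =====

theorem set_add_of_mem {α : Type} [BEq α] [LawfulBEq α] (s : PySem.Set α) (x : α) (h : x ∈ s) :
    PySem.Set.add s x = s := by
  simp [PySem.Set.add, h]

theorem update_add_swap {α : Type} [BEq α] [LawfulBEq α] (s t : PySem.Set α) (x : α) :
    PySem.Set.update s (PySem.Set.add t x) = PySem.Set.add (PySem.Set.update s t) x := by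
  by_cases h : x ∈ t
  · rw [set_add_of_mem t x h, set_add_of_mem]
    exact (PySem.Set.mem_update s t x).2 (Or.inr h)
  · simp [PySem.Set.add, h, PySem.Set.update, List.foldl_append]

theorem update_update {α : Type} [BEq α] [LawfulBEq α] (xs : List α) (t s : PySem.Set α) :
    PySem.Set.update s (PySem.Set.update t xs) = PySem.Set.update (PySem.Set.update s t) xs := by
  induction xs generalizing t s with
  | nil => rfl
  | cons x xs ih =>
    show PySem.Set.update s (PySem.Set.update (PySem.Set.add t x) xs) = _
    rw [ih, update_add_swap]
    rfl

theorem update_ofList {α : Type} [BEq α] [LawfulBEq α] (s : PySem.Set α) (xs : List α) :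
    PySem.Set.update s (PySem.Set.ofList xs) = PySem.Set.update s xs :=
  update_update xs [] s

theorem update_of_subset {α : Type} [BEq α] [LawfulBEq α] (xs : List α) (s : PySem.Set α)
    (h : ∀ x ∈ xs, x ∈ s) : PySem.Set.update s xs = s := by
  induction xs generalizing s with
  | nil => rfl
  | cons x xs ih =>
    show PySem.Set.update (PySem.Set.add s x) xs = s
    rw [set_add_of_mem s x (h x (by simp))]
    exact ih s (fun y hy => h y (by simp [hy]))

theorem update_append {α : Type} [BEq α] (s : PySem.Set α) (xs ys : List α) :
    PySem.Set.update s (xs ++ ys) = PySem.Set.update (PySem.Set.update s xs) ys := by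
  simp [PySem.Set.update, List.foldl_append]

theorem foldl_update_eq_update_flatten {α : Type} [BEq α] (L : List (List α)) (s : PySem.Set α) :
    L.foldl (fun s b => PySem.Set.update s b) s = PySem.Set.update s L.flatten := by
  induction L generalizing s with
  | nil => rfl
  | cons b L ih => rw [List.foldl_cons, ih, List.flatten_cons, update_append]

theorem getD_foldl_modify_gen {κ ν β : Type} [BEq κ] [LawfulBEq κ] (g : β → ν → ν) (d0 : ν)
    (l : List (κ × β)) (d : PySem.Dict κ ν) (c : κ) :
    (l.foldl (fun d p => d.modify p.1 d0 (g p.2)) d).getD c d0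
      = ((l.filter (fun p => p.1 == c)).map Prod.snd).foldl (fun v x => g x v) (d.getD c d0) := by
  induction l generalizing d with
  | nil => rfl
  | cons p l ih =>
    by_cases hp : p.1 = c
    · subst hp
      simp only [List.foldl_cons, ih, List.filter_cons, BEq.rfl, if_true, List.map_cons,
        PySem.Dict.getD_modify_self]
    · simp only [List.foldl_cons, ih, List.filter_cons, PySem.Dict.getD_modify_of_ne d d0 (g p.2) (Ne.symm hp)]
      simp [hp]

theorem getD_foldl_insert_const {κ ν : Type} [BEq κ] [LawfulBEq κ] (K : List κ) (d0 : ν)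
    (d : PySem.Dict κ ν) (h : ∀ c, d.getD c d0 = d0) (c : κ) :
    (K.foldl (fun d a => d.insert a d0) d).getD c d0 = d0 := by
  induction K generalizing d with
  | nil => exact h c
  | cons a K ih =>
    refine ih (d.insert a d0) (fun c => ?_)
    by_cases hc : c = a
    · subst hc; exact PySem.Dict.getD_insert_self d c d0 d0
    · rw [PySem.Dict.getD_insert_of_ne d d0 d0 hc]; exact h c

theorem keys_foldl_insert_empty {κ ν : Type} [BEq κ] [LawfulBEq κ] (K : List κ) (d0 : ν)
    (hK : K.Nodup) :
    (K.foldl (fun d a => d.insert a d0) PySem.Dict.empty).keys = K := by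
  have := PySem.Dict.items_foldl_insert_fresh K (fun a => a) (fun _ => d0) PySem.Dict.empty
    (fun a _ => rfl) (by simpa using hK)
  beta_reduce at this
  rw [PySem.Dict.keys, this]
  have h2 : List.map (fun x : κ × ν => x.1) (List.map (fun a => (a, d0)) K) = K := by
    rw [List.map_map]
    exact List.map_id K
  simpa [PySem.Dict.empty] using h2

theorem items_eq_of_keys_getD {κ ν : Type} [BEq κ] [LawfulBEq κ] (d0 : ν) :
    ∀ (l l' : List (κ × ν)), l.map Prod.fst = l'.map Prod.fst → (l.map Prod.fst).Nodup →
      (∀ c, (PySem.Dict.mk l).getD c d0 = (PySem.Dict.mk l').getD c d0) → l = l' := by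
  intro l
  induction l with
  | nil =>
    intro l' hk _ _
    exact (List.map_eq_nil_iff.1 hk.symm).symm ▸ rfl
  | cons p t ih =>
    intro l' hk hn hv
    cases l' with
    | nil => simp at hk
    | cons q t' =>
      simp only [List.map_cons, List.cons.injEq] at hk
      obtain ⟨h1, h2⟩ := hk
      have hval : p.2 = q.2 := by
        have := hv p.1
        simp [PySem.Dict.getD, PySem.Dict.get?, h1.symm] at this
        exact this
      have hpq : p = q := Prod.ext h1 hval
      simp only [List.map_cons, List.nodup_cons] at hn
      have htail : t = t' := by
        refine ih t' h2 hn.2 (fun c => ?_)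
        by_cases hc : c = p.1
        · subst hc
          have h1' : ¬ p.1 ∈ t.map Prod.fst := hn.1
          have h2' : ¬ p.1 ∈ t'.map Prod.fst := h2 ▸ hn.1
          simp only [PySem.Dict.getD, PySem.Dict.get?]
          rw [List.find?_eq_none.2, List.find?_eq_none.2]
          · intro x hx hbe
            exact h2' (List.mem_map.2 ⟨x, hx, by simpa using hbe⟩)
          · intro x hx hbe
            exact h1' (List.mem_map.2 ⟨x, hx, by simpa using hbe⟩)
        · have hb1 : (p.1 == c) = false := beq_eq_false_iff_ne.2 (Ne.symm hc)
          have hb2 : (q.1 == c) = false := h1 ▸ hb1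
          have hvc := hv c
          simp only [PySem.Dict.getD, PySem.Dict.get?] at hvc ⊢
          rwa [List.find?_cons_of_neg (by simp [hb1]), List.find?_cons_of_neg (by simp [hb2])] at hvc
      rw [hpq, htail]

theorem dict_eq_of_keys_getD {κ ν : Type} [BEq κ] [LawfulBEq κ] (d d' : PySem.Dict κ ν) (d0 : ν)
    (hk : d.keys = d'.keys) (hn : d.keys.Nodup) (hv : ∀ c, d.getD c d0 = d'.getD c d0) : d = d' :=
  PySem.Dict.ext (items_eq_of_keys_getD d0 d.items d'.items hk hn hv)

theorem foldl_nested_flatMap {α β γ σ : Type} (f : σ → γ → σ) (h : α → List β) (k : α → β → γ)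
    (l : List α) (init : σ) :
    l.foldl (fun s p => (h p).foldl (fun s a => f s (k p a)) s) init
      = (l.flatMap (fun p => (h p).map (k p))).foldl f init := by
  induction l generalizing init with
  | nil => rfl
  | cons p l ih => simp [List.foldl_append, List.foldl_map, ih]

theorem foldl_modify_init_defaults {κ ν β : Type} [BEq κ] [LawfulBEq κ] (g : β → ν → ν) (d0 : ν)
    (l : List (κ × β)) :
    l.foldl (fun d p => d.modify p.1 d0 (g p.2))
        ((PySem.Set.ofList (l.map Prod.fst)).foldl (fun d a => d.insert a d0) PySem.Dict.empty)
      = l.foldl (fun d p => d.modify p.1 d0 (g p.2)) PySem.Dict.empty := by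
  set K : PySem.Set κ := PySem.Set.ofList (l.map Prod.fst) with hKdef
  have hKnd : K.Nodup := PySem.Set.nodup_ofList _
  have hinit_keys : ((K : List κ).foldl (fun d a => d.insert a d0) PySem.Dict.empty).keys = K :=
    keys_foldl_insert_empty K d0 hKnd
  apply dict_eq_of_keys_getD _ _ d0
  · rw [PySem.Dict.keys_foldl_modify_key l Prod.fst d0 (fun _ p => g p.2), hinit_keys,
        PySem.Dict.keys_foldl_modify_key l Prod.fst d0 (fun _ p => g p.2)]
    have hsub : ∀ x ∈ l.map Prod.fst, x ∈ K := fun x hx => (PySem.Set.mem_ofList _ x).2 hx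
    rw [update_of_subset _ K hsub]
    rfl
  · rw [PySem.Dict.keys_foldl_modify_key l Prod.fst d0 (fun _ p => g p.2), hinit_keys,
        update_of_subset _ K (fun x hx => (PySem.Set.mem_ofList _ x).2 hx)]
    exact hKnd
  · intro c
    rw [getD_foldl_modify_gen, getD_foldl_modify_gen]
    rw [getD_foldl_insert_const K d0 PySem.Dict.empty (fun _ => rfl) c]
    rfl

-- items of a modify-loop from the empty dict, as a map over the deduped keys
theorem items_foldl_modify_eq_map {κ ν β : Type} [BEq κ] [LawfulBEq κ] (g : β → ν → ν) (d0 : ν)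
    (l : List (κ × β)) :
    (l.foldl (fun d p => d.modify p.1 d0 (g p.2)) PySem.Dict.empty).items
      = (PySem.Set.ofList (l.map Prod.fst)).map
          (fun k => (k, ((l.filter (fun e => e.1 == k)).map Prod.snd).foldl (fun v x => g x v) d0)) := by
  have hkeys : (l.foldl (fun d p => d.modify p.1 d0 (g p.2)) PySem.Dict.empty).keys
      = PySem.Set.ofList (l.map Prod.fst) := by
    rw [PySem.Dict.keys_foldl_modify_key l Prod.fst d0 (fun _ p => g p.2)]
    rfl
  have hnd : (l.foldl (fun d p => d.modify p.1 d0 (g p.2)) PySem.Dict.empty).keys.Nodup := by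
    rw [hkeys]; exact PySem.Set.nodup_ofList _
  rw [PySem.Dict.items_eq_map_keys _ hnd d0, hkeys]
  refine List.map_congr_left (fun k hk => ?_)
  rw [getD_foldl_modify_gen g d0 l PySem.Dict.empty k]
  rfl

theorem build_eq (foods : List (List String × List String)) :
    build_data_structures foods = build_data_structures_alt foods := by
  set pairs : List (String × List String) :=
    foods.flatMap (fun p => p.2.map (fun a => (a, p.1))) with hpairs
  have hK : foods.foldl (fun s p => p.2.foldl PySem.Set.add s) PySem.Set.empty
      = PySem.Set.ofList (pairs.map Prod.fst) := by
    refine (foldl_nested_flatMap PySem.Set.add (fun p => p.2) (fun p a => a) foods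
      PySem.Set.empty).trans ?_
    show PySem.Set.ofList (foods.flatMap fun p => p.2.map (fun a => a)) = _
    congr 1
    simp [hpairs, List.map_flatMap, List.map_map, Function.comp_def]
  have hA : build_data_structures foods
      = ((pairs.foldl
            (fun d e => d.modify e.1 [] (fun v => v ++ [e.2]))
            ((foods.foldl (fun s p => p.2.foldl PySem.Set.add s) PySem.Set.empty).foldl
              (fun d a => d.insert a ([] : List (List String))) PySem.Dict.empty)).items,
         (pairs.foldl
            (fun d e => d.modify e.1 PySem.Set.empty
              (fun s => PySem.Set.update s (PySem.Set.ofList e.2)))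
            ((foods.foldl (fun s p => p.2.foldl PySem.Set.add s) PySem.Set.empty).foldl
              (fun d a => d.insert a (PySem.Set.empty : PySem.Set String)) PySem.Dict.empty)).items) := by
    exact congrArg
      (fun r : PySem.Dict String (List (List String)) × PySem.Dict String (PySem.Set String) =>
        (r.1.items, r.2.items))
      ((foldl_nested_flatMap
          (fun (st : PySem.Dict String (List (List String)) × PySem.Dict String (PySem.Set String))
               (e : String × List String) =>
            (st.1.modify e.1 [] (fun v => v ++ [e.2]),
             st.2.modify e.1 PySem.Set.empty (fun s => PySem.Set.update s (PySem.Set.ofList e.2))))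
          (fun p => p.2) (fun p a => (a, p.1)) foods _).trans
        (PySem.List.foldl_prod_mk
          (fun (d : PySem.Dict String (List (List String))) (e : String × List String) =>
            d.modify e.1 [] (fun v => v ++ [e.2]))
          (fun (d : PySem.Dict String (PySem.Set String)) (e : String × List String) =>
            d.modify e.1 PySem.Set.empty (fun s => PySem.Set.update s (PySem.Set.ofList e.2)))
          pairs _ _))
  have hfe : (fun (d : PySem.Dict String (PySem.Set String)) (e : String × List String) =>
        d.modify e.1 PySem.Set.empty (fun s => PySem.Set.update s (PySem.Set.ofList e.2)))
      = (fun d e => d.modify e.1 PySem.Set.empty (fun s => PySem.Set.update s e.2)) := by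
    funext d e
    congr 1
    funext s
    exact update_ofList s e.2
  rw [hA, hK, hfe]
  rw [foldl_modify_init_defaults (fun (b : List String) (v : List (List String)) => v ++ [b]) [] pairs,
      foldl_modify_init_defaults (fun (b : List String) (s : PySem.Set String) => PySem.Set.update s b)
        PySem.Set.empty pairs]
  rw [items_foldl_modify_eq_map (fun (b : List String) (v : List (List String)) => v ++ [b]) [] pairs,
      items_foldl_modify_eq_map (fun (b : List String) (s : PySem.Set String) => PySem.Set.update s b)
        PySem.Set.empty pairs]
  show (_, _) = build_data_structures_alt foods
  unfold build_data_structures_alt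
  rw [← hpairs]
  simp only [PySem.List.dedup_eq_ofList]
  refine Prod.ext ?_ ?_
  · refine List.map_congr_left (fun k hk => ?_)
    rw [PySem.List.foldl_append_singleton_eq_map]
    simp
  · refine List.map_congr_left (fun k hk => ?_)
    have : ((pairs.filter (fun e => e.1 == k)).map Prod.snd).foldl
        (fun (v : PySem.Set String) (x : List String) => PySem.Set.update v x) PySem.Set.empty
        = PySem.Set.update PySem.Set.empty ((pairs.filter (fun e => e.1 == k)).map Prod.snd).flatten :=
      foldl_update_eq_update_flatten _ _
    rw [this]
    congr 1

-- ===== VERDICT (by name: the statement is the Claim_ definition above) =====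
theorem build_data_structures_spec : Claim_equal_build_data_structures := by
  intro foods _
  show build_data_structures foods = build_data_structures_alt foods
  exact build_eq foods
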